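-- pv_equiv track=rewrite | github.com/SatoshiJIshida/projects | Python - Coding Challenges/electionswinners.py | solution
-- ===== SOURCE A (Python) =====
-- def solution(votes, k):
--     maximum = max(votes)
--     votes.sort()
--     posOfMax = max(i for i, el in enumerate(votes) if el == maximum)
--     occurs = posOfMax - votes.index(maximum)+1
--     count = 0
--
--     for i in range(len(votes)):
--         votes[i] += k
--         if votes[i] > maximum:
--             count += 1
--         if k == 0 and occurs == 1:
--             return 1
--         if k == 0 and occurs > 1:
--             return 0
--
--     return count
-- ===== SOURCE B (Python) =====
-- def solution(votes, k):
--     m = max(votes)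
--     if k == 0:
--         return 1 if votes.count(m) == 1 else 0
--     return sum(1 for v in votes if v + k > m)
-- ===== Notes on version B (the rewrite author's own statement) =====
-- stated objective: faster
-- what changed: Replaces the sort + enumerate/index scan over the sorted copy by a single linear pass: count of the maximum decides the k==0 case and otherwise the winners are counted directly, with no sort and no in-place mutation of votes.
-- outside the precondition, e.g. on solution([], 0): A raises ValueError, B raises ValueError
import Mathlib
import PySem

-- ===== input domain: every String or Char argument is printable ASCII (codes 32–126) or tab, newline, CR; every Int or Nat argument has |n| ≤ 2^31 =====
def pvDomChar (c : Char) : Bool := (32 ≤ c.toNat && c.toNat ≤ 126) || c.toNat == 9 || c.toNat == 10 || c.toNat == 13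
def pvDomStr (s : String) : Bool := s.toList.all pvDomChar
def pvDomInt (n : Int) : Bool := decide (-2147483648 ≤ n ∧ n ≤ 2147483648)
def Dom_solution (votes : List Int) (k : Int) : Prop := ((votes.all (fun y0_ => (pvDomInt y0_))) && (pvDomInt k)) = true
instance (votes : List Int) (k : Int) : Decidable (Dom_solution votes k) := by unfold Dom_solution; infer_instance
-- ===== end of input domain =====

-- B replaces A's sort + positional scans by one linear counting pass (no sort); A mutates
-- `votes` in place (sort, += k) — the equivalence proved here is about the RETURN value only.

-- ===== PORT A =====
-- the for-loop of A: each element is read once, gets k added, is compared with maximum,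
-- and the two k == 0 early returns fire (if at all) in the first iteration
def solutionLoop (k maximum occurs : Int) : List Int → Int → Int
  | [], count => count
  | v :: rest, count =>
    let v' := v + k
    let count' := if v' > maximum then count + 1 else count
    if k = 0 ∧ occurs = 1 then 1
    else if k = 0 ∧ occurs > 1 then 0
    else solutionLoop k maximum occurs rest count'

def solution (votes : List Int) (k : Int) : Int :=
  match PySem.List.max? votes (fun x => x) with
  | none => 0  -- max([]) raises ValueError: excluded by Pre_solution
  | some maximum =>
    let s := PySem.List.sorted votes (fun x => x) false
    -- max(i for i, el in enumerate(votes) if el == maximum); generator nonempty since maximum ∈ s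
    let posOfMax := (PySem.List.max? (((PySem.List.enumerate s 0).filter
        (fun p => p.2 == maximum)).map (fun p => p.1)) (fun x => x)).getD 0
    -- votes.index(maximum); always found since maximum ∈ s
    let idx : Int := ((PySem.List.index? s maximum).getD 0 : Nat)
    let occurs := posOfMax - idx + 1
    solutionLoop k maximum occurs s 0

-- ===== PORT B =====
def solution_alt (votes : List Int) (k : Int) : Int :=
  match PySem.List.max? votes (fun x => x) with
  | none => 0  -- max([]) raises ValueError: excluded by Pre_solution
  | some m =>
    if k = 0 then (if PySem.List.count votes m = 1 then 1 else 0)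
    else (votes.countP (fun v => decide (v + k > m)) : Int)

-- ===== PRECONDITION & SPEC =====
-- A raises ValueError on the empty list (max([])); that is the only exclusion.
def Pre_solution (votes : List Int) (k : Int) : Prop := votes ≠ []
instance (votes : List Int) (k : Int) : Decidable (Pre_solution votes k) := by unfold Pre_solution; infer_instance
def pvWitness_solution : List Int × Int := ([3, 1, 3, 2], 2)

def Spec_solution (votes : List Int) (k : Int) (out : Int) : Prop := out = solution_alt votes k
instance (votes : List Int) (k : Int) (out : Int) : Decidable (Spec_solution votes k out) := by unfold Spec_solution; infer_instance

-- ===== CLAIM (what is proved, stated in full; the proofs are below) =====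
def Claim_equal_solution : Prop := ∀ (votes : List Int) (k : Int), Dom_solution votes k → Pre_solution votes k → Spec_solution votes k (solution votes k)

-- ===== LEMMAS AND PROOFS =====

-- a sorted list whose elements are all ≤ m splits as (elements < m) ++ (copies of m)
lemma sorted_split (s : List Int) (m : Int) (hp : s.Pairwise (· ≤ ·)) (hle : ∀ x ∈ s, x ≤ m) :
    s = s.filter (fun x => decide (x < m)) ++ List.replicate (s.count m) m := by
  induction s with
  | nil => simp
  | cons a t ih =>
    rcases List.pairwise_cons.mp hp with ⟨hat, ht⟩
    by_cases ha : a < m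
    · have hne : a ≠ m := ne_of_lt ha
      have hcount : (a :: t).count m = t.count m := by simp [hne]
      rw [hcount]
      simp only [List.filter_cons, ha, decide_true, if_true]
      rw [List.cons_append]
      exact congrArg (a :: ·) (ih ht (fun x hx => hle x (List.mem_cons_of_mem _ hx)))
    · have ham : a = m := le_antisymm (hle a (by simp)) (not_lt.mp ha)
      subst ham
      have htall : ∀ x ∈ t, x = a := fun x hx =>
        le_antisymm (hle x (List.mem_cons_of_mem _ hx)) (hat x hx)
      have ht' : t = List.replicate t.length a := List.eq_replicate_length.mpr htall
      have hf : (a :: t).filter (fun x => decide (x < a)) = [] := by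
        rw [List.filter_eq_nil_iff]
        intro x hx
        rcases List.mem_cons.mp hx with h | h
        · simp [h]
        · simp [htall x h]
      rw [hf, List.nil_append]
      have hc : (a :: t).count a = t.length + 1 := by
        rw [List.count_cons_self]
        conv_lhs => rw [ht']
        simp
      rw [hc]
      conv_lhs => rw [ht']
      simp [List.replicate_succ]

-- loop behaviour for k ≠ 0: no early return, the loop counts v + k > maximum
lemma solutionLoop_ne_zero (k maximum occurs : Int) (hk : k ≠ 0) (l : List Int) (c : Int) :
    solutionLoop k maximum occurs l c = c + (l.countP (fun v => decide (v + k > maximum)) : Int) := by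
  induction l generalizing c with
  | nil => simp [solutionLoop]
  | cons v rest ih =>
    have h1 : ¬ (k = 0 ∧ occurs = 1) := fun h => hk h.1
    have h2 : ¬ (k = 0 ∧ occurs > 1) := fun h => hk h.1
    simp only [solutionLoop, h1, h2, if_false, List.countP_cons]
    rw [ih]
    by_cases hv : v + k > maximum
    · simp only [hv, decide_true]
      push_cast
      ring
    · simp only [hv, decide_false]
      push_cast
      ring

-- loop behaviour for k = 0 on a nonempty list: returns from the first iteration
lemma solutionLoop_zero (maximum occurs : Int) (hocc : 1 ≤ occurs) (v : Int) (l : List Int) (c : Int) :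
    solutionLoop 0 maximum occurs (v :: l) c = if occurs = 1 then 1 else 0 := by
  simp only [solutionLoop]
  by_cases h1 : occurs = 1
  · simp [h1]
  · have h2 : occurs > 1 := lt_of_le_of_ne hocc (Ne.symm h1)
    simp [h1, h2]

-- posOfMax for the decomposed sorted list: the max matching index is length - 1
lemma posOfMax_eval (f : List Int) (c : Nat) (m : Int) (hc : 1 ≤ c)
    (hf : ∀ x ∈ f, x < m) :
    (PySem.List.max? (((PySem.List.enumerate (f ++ List.replicate c m) 0).filter
        (fun p => p.2 == m)).map (fun p => p.1)) (fun x => x)).getD 0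
      = (f.length : Int) + (c : Int) - 1 := by
  have hfilter : ((PySem.List.enumerate (f ++ List.replicate c m) 0).filter
      (fun p => p.2 == m)) = PySem.List.enumerate (List.replicate c m) (0 + f.length) := by
    rw [PySem.List.enumerate_append, List.filter_append]
    have h1 : (PySem.List.enumerate f 0).filter (fun p => p.2 == m) = [] := by
      rw [List.filter_eq_nil_iff]
      intro p hp
      obtain ⟨j, hj, rfl⟩ := (PySem.List.mem_enumerate_iff f 0 p).mp hp
      simp [ne_of_lt (hf _ (List.getElem_mem hj))]
    have h2 : (PySem.List.enumerate (List.replicate c m) (0 + f.length)).filter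
        (fun p => p.2 == m) = PySem.List.enumerate (List.replicate c m) (0 + f.length) := by
      rw [List.filter_eq_self]
      intro p hp
      obtain ⟨j, hj, rfl⟩ := (PySem.List.mem_enumerate_iff _ _ p).mp hp
      simp_all
    rw [h1, h2, List.nil_append]
  rw [hfilter, PySem.List.map_fst_enumerate]
  have hmem : ((f.length : Int) + (c : Int) - 1) ∈
      PySem.List.pyRange (0 + (f.length : Int)) (0 + (f.length : Int) + (List.replicate c m).length) := by
    rw [PySem.List.mem_pyRange_one]
    simp only [List.length_replicate]
    omega
  cases hmax : PySem.List.max? (PySem.List.pyRange (0 + (f.length : Int))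
      (0 + (f.length : Int) + (List.replicate c m).length)) (fun x => x) with
  | none =>
    rw [PySem.List.max?_eq_none_iff] at hmax
    rw [hmax] at hmem
    simp at hmem
  | some M =>
    have hMmem := PySem.List.max?_mem hmax
    have hMmax := PySem.List.max?_isMax hmax
    rw [PySem.List.mem_pyRange_one] at hMmem
    simp only [List.length_replicate] at hMmem
    have hle := hMmax _ hmem
    simp only [Option.getD_some]
    omega

-- index? for the decomposed sorted list: first occurrence of m is at f.length
lemma index_eval (f : List Int) (c : Nat) (m : Int) (hc : 1 ≤ c)
    (hf : ∀ x ∈ f, x < m) :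
    PySem.List.index? (f ++ List.replicate c m) m = some f.length := by
  rw [PySem.List.index?_eq_some_iff]
  refine ⟨f, List.replicate (c - 1) m, ?_, rfl, fun hm => absurd rfl (ne_of_lt (hf m hm))⟩
  congr 1
  rw [← List.replicate_succ]
  congr 1
  omega

theorem solution_eq (votes : List Int) (k : Int) (hne : votes ≠ []) :
    solution votes k = solution_alt votes k := by
  cases hm : PySem.List.max? votes (fun x => x) with
  | none => exact absurd ((PySem.List.max?_eq_none_iff votes _).mp hm) hne
  | some m =>
    have hmemv : m ∈ votes := PySem.List.max?_mem hm
    have hmax : ∀ y ∈ votes, y ≤ m := PySem.List.max?_isMax hm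
    have hperm : (PySem.List.sorted votes (fun x => x) false).Perm votes :=
      PySem.List.sorted_perm votes _ false
    obtain ⟨f, c, hsp, hf, hc, hcv⟩ : ∃ f c,
        PySem.List.sorted votes (fun x => x) false = f ++ List.replicate c m ∧
        (∀ x ∈ f, x < m) ∧ 1 ≤ c ∧ votes.count m = c := by
      refine ⟨(PySem.List.sorted votes (fun x => x) false).filter (fun x => decide (x < m)),
        (PySem.List.sorted votes (fun x => x) false).count m,
        sorted_split _ m (PySem.List.sorted_pairwise votes _)
          (fun x hx => hmax x (hperm.mem_iff.mp hx)), ?_, ?_, ?_⟩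
      · intro x hx
        simpa using (List.mem_filter.mp hx).2
      · exact List.count_pos_iff.mpr (hperm.mem_iff.mpr hmemv)
      · exact (hperm.count_eq m).symm
    simp only [solution, solution_alt, hm]
    rw [hsp, posOfMax_eval f c m hc hf, index_eval f c m hc hf]
    simp only [Option.getD_some]
    have hocc : (f.length : Int) + (c : Int) - 1 - (f.length : Int) + 1 = (c : Int) := by ring
    rw [hocc]
    by_cases hk : k = 0
    · subst hk
      obtain ⟨v, l, hvl⟩ : ∃ v l, f ++ List.replicate c m = v :: l := by
        cases h : f ++ List.replicate c m with
        | nil =>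
          exfalso
          have := congrArg List.length h
          simp at this
          omega
        | cons a b => exact ⟨a, b, rfl⟩
      rw [hvl, solutionLoop_zero m (c : Int) (by exact_mod_cast hc) v l 0]
      simp only [PySem.List.count_eq, hcv]
      by_cases hc1 : c = 1
      · simp [hc1]
      · have h1 : ¬ ((c : Int) = 1) := by omega
        simp [hc1, h1]
    · rw [solutionLoop_ne_zero k m (c : Int) hk, ← hsp, if_neg hk, zero_add]
      exact_mod_cast hperm.countP_eq (fun v => decide (v + k > m))

-- ===== VERDICT (by name: the statement is the Claim_ definition above) =====
theorem solution_spec : Claim_equal_solution := by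
  intro votes k _ hpre
  exact solution_eq votes k hpre
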